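-- pv_equiv track=rewrite | github.com/fengyuli-dev/debias-recommender | data_utils.py | generate_users_items
-- ===== SOURCE A (Python) =====
-- def generate_users_items(ratings, m, n):
--     """
--     Helper function that takes as input a dictionary of ratings and outputs two dictionaries of users and items.
--     """
--     users = {}
--     items = {}
--     for i in range(m):
--         users[i] = [None] * n
--     for i in range(n):
--         items[i] = [None] * m
--     for (user_id, item_id), rating in ratings.items():
--         users[user_id][item_id] = rating
--         items[item_id][user_id] = rating
--     return users, items
-- ===== SOURCE B (Python) =====
-- def generate_users_items(ratings, m, n):
--     """
--     Build only the users matrix from the sparse ratings, then obtain items by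
--     transposing the fully-built users matrix (dict comprehension over columns).
--     """
--     users = {}
--     for i in range(m):
--         users[i] = [None] * n
--     for (user_id, item_id), rating in ratings.items():
--         users[user_id][item_id] = rating
--     items = {j: [users[i][j] for i in range(m)] for j in range(n)}
--     return users, items
-- ===== Notes on version B (the rewrite author's own statement) =====
-- stated objective: alternative
-- what changed: B fills only the users matrix from the sparse ratings and then derives the items matrix by transposing the finished users matrix, instead of A's second None-init pass plus a second per-rating write into items.
import Mathlib
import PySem

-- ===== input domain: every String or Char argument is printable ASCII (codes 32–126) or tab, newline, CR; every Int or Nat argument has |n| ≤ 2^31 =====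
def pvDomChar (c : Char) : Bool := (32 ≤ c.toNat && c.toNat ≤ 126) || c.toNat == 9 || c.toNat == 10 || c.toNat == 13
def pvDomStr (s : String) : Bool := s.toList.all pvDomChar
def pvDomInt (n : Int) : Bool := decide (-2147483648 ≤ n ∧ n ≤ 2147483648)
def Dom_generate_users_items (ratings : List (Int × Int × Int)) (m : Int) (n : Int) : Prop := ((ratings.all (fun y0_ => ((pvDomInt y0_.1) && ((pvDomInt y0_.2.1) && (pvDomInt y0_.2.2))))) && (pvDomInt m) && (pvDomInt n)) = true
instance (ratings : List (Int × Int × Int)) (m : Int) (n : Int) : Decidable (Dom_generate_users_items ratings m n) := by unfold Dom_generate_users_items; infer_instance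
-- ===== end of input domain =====

-- B replaces A's second init-and-fill pass for the items matrix by a transpose of the
-- finished users matrix (an alternative decomposition; same cost, proved equal).
-- ratings is a Python dict keyed by (user_id, item_id); here it is the association
-- list of triples (user_id, item_id, rating) in insertion order.

-- ===== PORT A =====
def generate_users_items (ratings : List (Int × Int × Int)) (m : Int) (n : Int) : (List (Int × List (Option Int))) × (List (Int × List (Option Int))) :=
  -- users = {}; for i in range(m): users[i] = [None] * n
  let users : PySem.Dict Int (List (Option Int)) :=
    (PySem.List.pyRange 0 m 1).foldl (fun d i => d.insert i (PySem.List.pyRepeat [none] n)) PySem.Dict.empty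
  -- items = {}; for i in range(n): items[i] = [None] * m
  let items : PySem.Dict Int (List (Option Int)) :=
    (PySem.List.pyRange 0 n 1).foldl (fun d i => d.insert i (PySem.List.pyRepeat [none] m)) PySem.Dict.empty
  -- for (user_id, item_id), rating in ratings.items():
  --     users[user_id][item_id] = rating ; items[item_id][user_id] = rating
  -- (Dict.modify with default [] equals Python's d[k][i] = v whenever k is a key of d
  --  and the index is in range, which Pre_ guarantees; elsewhere Python raises.)
  let st := ratings.foldl
    (fun (st : PySem.Dict Int (List (Option Int)) × PySem.Dict Int (List (Option Int))) t =>
      (st.1.modify t.1 [] (fun row => PySem.List.pySetD row t.2.1 t.2.2),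
       st.2.modify t.2.1 [] (fun col => PySem.List.pySetD col t.1 t.2.2)))
    (users, items)
  (st.1.items, st.2.items)

-- ===== PORT B =====
def generate_users_items_alt (ratings : List (Int × Int × Int)) (m : Int) (n : Int) : (List (Int × List (Option Int))) × (List (Int × List (Option Int))) :=
  -- users = {}; for i in range(m): users[i] = [None] * n
  let users0 : PySem.Dict Int (List (Option Int)) :=
    (PySem.List.pyRange 0 m 1).foldl (fun d i => d.insert i (PySem.List.pyRepeat [none] n)) PySem.Dict.empty
  -- for (user_id, item_id), rating in ratings.items(): users[user_id][item_id] = rating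
  let users := ratings.foldl
    (fun (d : PySem.Dict Int (List (Option Int))) t =>
      d.modify t.1 [] (fun row => PySem.List.pySetD row t.2.1 t.2.2)) users0
  -- items = {j: [users[i][j] for i in range(m)] for j in range(n)}
  -- (keys 0..n-1 are distinct, so the dict comprehension IS this association list;
  --  users[i][j] reads are exact via getD/pyGetD since i is a key and 0 ≤ j < n.)
  let items := (PySem.List.pyRange 0 n 1).map (fun j =>
    (j, (PySem.List.pyRange 0 m 1).map (fun i => PySem.List.pyGetD (users.getD i []) j none)))
  (users.items, items)

-- ===== PRECONDITION & SPEC =====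
-- Pre_ excludes exactly the inputs on which A raises (KeyError on a user_id outside
-- range(m) or item_id outside range(n), IndexError on an out-of-range column index).
def Pre_generate_users_items (ratings : List (Int × Int × Int)) (m : Int) (n : Int) : Prop :=
  ∀ t ∈ ratings, 0 ≤ t.1 ∧ t.1 < m ∧ 0 ≤ t.2.1 ∧ t.2.1 < n
instance (ratings : List (Int × Int × Int)) (m : Int) (n : Int) : Decidable (Pre_generate_users_items ratings m n) := by unfold Pre_generate_users_items; infer_instance

def pvWitness_generate_users_items : (List (Int × Int × Int)) × Int × Int := ([(0, 1, 5), (1, 0, -3)], 2, 2)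

def Spec_generate_users_items (ratings : List (Int × Int × Int)) (m : Int) (n : Int) (out : (List (Int × List (Option Int))) × (List (Int × List (Option Int)))) : Prop := out = generate_users_items_alt ratings m n
instance (ratings : List (Int × Int × Int)) (m : Int) (n : Int) (out : (List (Int × List (Option Int))) × (List (Int × List (Option Int)))) : Decidable (Spec_generate_users_items ratings m n out) := by unfold Spec_generate_users_items; infer_instance

-- ===== CLAIM (what is proved, stated in full; the proofs are below) =====
def Claim_equal_generate_users_items : Prop := ∀ (ratings : List (Int × Int × Int)) (m : Int) (n : Int), Dom_generate_users_items ratings m n → Pre_generate_users_items ratings m n → Spec_generate_users_items ratings m n (generate_users_items ratings m n)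

-- ===== LEMMAS AND PROOFS =====

-- the users-matrix update step shared (as code) by both ports
def pvStep (d : PySem.Dict Int (List (Option Int))) (t : Int × Int × Int) : PySem.Dict Int (List (Option Int)) :=
  d.modify t.1 [] (fun row => PySem.List.pySetD row t.2.1 t.2.2)

-- the items-matrix update step of port A
def pvStepI (d : PySem.Dict Int (List (Option Int))) (t : Int × Int × Int) : PySem.Dict Int (List (Option Int)) :=
  d.modify t.2.1 [] (fun col => PySem.List.pySetD col t.1 t.2.2)

-- the None-initialised dictionary {0: [None]*sz, …, k-1: [None]*sz}
def pvInit (k : Int) (sz : Int) : PySem.Dict Int (List (Option Int)) :=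
  (PySem.List.pyRange 0 k 1).foldl (fun d i => d.insert i (PySem.List.pyRepeat [none] sz)) PySem.Dict.empty

lemma pvFold_getD (l : List Int) (d : PySem.Dict Int (List (Option Int))) (v : List (Option Int)) (j : Int) :
    (l.foldl (fun d i => d.insert i v) d).getD j [] = if j ∈ l then v else d.getD j [] := by
  induction l generalizing d with
  | nil => simp
  | cons x xs ih =>
    simp only [List.foldl_cons, ih, PySem.Dict.getD_insert, List.mem_cons]
    by_cases hx : j = x <;> by_cases hm : j ∈ xs <;> simp [hx, hm]

lemma pvFold_contains (l : List Int) (d : PySem.Dict Int (List (Option Int))) (v : List (Option Int)) (j : Int) :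
    (l.foldl (fun d i => d.insert i v) d).contains j = (decide (j ∈ l) || d.contains j) := by
  induction l generalizing d with
  | nil => simp
  | cons x xs ih =>
    simp only [List.foldl_cons, ih, PySem.Dict.contains_insert, List.mem_cons]
    by_cases hx : j = x <;> by_cases hm : j ∈ xs <;> simp [hx, hm]

lemma pvInit_getD (k sz j : Int) :
    (pvInit k sz).getD j [] = if 0 ≤ j ∧ j < k then List.replicate sz.toNat none else [] := by
  unfold pvInit
  rw [pvFold_getD]
  simp [PySem.List.mem_pyRange_one, PySem.List.pyRepeat_singleton]

lemma pvInit_contains (k sz j : Int) (h0 : 0 ≤ j) (h1 : j < k) :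
    (pvInit k sz).contains j = true := by
  unfold pvInit
  rw [pvFold_contains]
  simp [PySem.List.mem_pyRange_one, h0, h1]

lemma pvInit_keys (k sz : Int) : (pvInit k sz).keys = PySem.List.pyRange 0 k 1 := by
  unfold pvInit
  rw [PySem.Dict.keys_foldl_insert (f := fun _ _ => PySem.List.pyRepeat [none] sz)]
  rw [PySem.Dict.keys_empty, PySem.Set.update_nil_left,
    PySem.Set.ofList_eq_self_of_nodup _ (PySem.List.nodup_pyRange_one 0 k)]

-- a pair-state fold splits into two independent folds
lemma pvFold_pair (rs : List (Int × Int × Int)) (a b : PySem.Dict Int (List (Option Int))) :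
    rs.foldl (fun st t => (pvStep st.1 t, pvStepI st.2 t)) (a, b)
      = (rs.foldl pvStep a, rs.foldl pvStepI b) := by
  induction rs generalizing a b with
  | nil => rfl
  | cons t ts ih => simp only [List.foldl_cons, ih]

-- keys of A's items dict are unchanged by the ratings fold
lemma pvFoldI_keys : ∀ (rs : List (Int × Int × Int)) (ic : PySem.Dict Int (List (Option Int))),
    (∀ t ∈ rs, ic.contains t.2.1 = true) → (rs.foldl pvStepI ic).keys = ic.keys := by
  intro rs
  induction rs with
  | nil => intro ic _; rfl
  | cons t ts ih =>
    intro ic hk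
    simp only [List.foldl_cons]
    have hstep : (pvStepI ic t).keys = ic.keys := by
      unfold pvStepI
      rw [PySem.Dict.keys_modify, PySem.Dict.keys_insert_of_contains _ _ (hk t List.mem_cons_self)]
    rw [ih _ ?_, hstep]
    intro x hx
    unfold pvStepI
    rw [PySem.Dict.contains_modify]
    simp [hk x (List.mem_cons_of_mem _ hx)]

-- one rating write: reading any in-range column of the written row
lemma pvGet_set (row : List (Option Int)) (nN : Nat) (hrow : row.length = nN)
    (i0 j : Int) (hi0 : 0 ≤ i0) (_hi1 : i0 < (nN : Int)) (hj0 : 0 ≤ j) (hj1 : j < (nN : Int)) (r : Int) :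
    PySem.List.pyGetD (PySem.List.pySetD row i0 r) j none
      = if j = i0 then some r else PySem.List.pyGetD row j none := by
  rw [PySem.List.pySetD_of_nonneg _ _ hi0,
    PySem.List.pyGetD_eq_getElem _ _ hj0 (by simp [hrow]; omega),
    List.getElem_set]
  split_ifs with h1 h2 h2
  · rfl
  · omega
  · omega
  · rw [PySem.List.pyGetD_eq_getElem _ _ hj0 (by rw [hrow]; omega)]

-- transpose invariant: A's items dict stays, columnwise, the transpose of the users dict
lemma pvTranspose (m n : Int) : ∀ (rs : List (Int × Int × Int))
    (u ic : PySem.Dict Int (List (Option Int))),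
    (∀ t ∈ rs, 0 ≤ t.1 ∧ t.1 < m ∧ 0 ≤ t.2.1 ∧ t.2.1 < n) →
    (∀ i : Int, 0 ≤ i → i < m → (u.getD i []).length = n.toNat) →
    (∀ j : Int, 0 ≤ j → j < n →
       ic.getD j [] = (PySem.List.pyRange 0 m 1).map (fun i => PySem.List.pyGetD (u.getD i []) j none)) →
    ∀ j : Int, 0 ≤ j → j < n →
    (rs.foldl pvStepI ic).getD j []
      = (PySem.List.pyRange 0 m 1).map (fun i => PySem.List.pyGetD ((rs.foldl pvStep u).getD i []) j none) := by
  intro rs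
  induction rs with
  | nil => intro u ic _ _ hinv j h0 h1; exact hinv j h0 h1
  | cons t ts ih =>
    intro u ic hpre hlen hinv j h0 h1
    obtain ⟨hu0, hu1, hi0, hi1⟩ := hpre t List.mem_cons_self
    simp only [List.foldl_cons]
    refine ih _ _ (fun x hx => hpre x (List.mem_cons_of_mem _ hx)) ?_ ?_ j h0 h1
    · -- lengths preserved by one step
      intro i' h0' h1'
      simp only [pvStep, PySem.Dict.getD_modify]
      split_ifs with h
      · rw [PySem.List.length_pySetD]; exact h ▸ hlen i' h0' h1'
      · exact hlen i' h0' h1'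
    · -- invariant preserved by one step
      intro j' hj0 hj1
      have hrow : (u.getD t.1 []).length = n.toNat := hlen t.1 hu0 hu1
      have hset : ∀ i : Int, 0 ≤ i → i < m →
          PySem.List.pyGetD ((pvStep u t).getD i []) j' none
            = if i = t.1 ∧ j' = t.2.1 then some t.2.2
              else PySem.List.pyGetD (u.getD i []) j' none := by
        intro i hh0 hh1
        simp only [pvStep, PySem.Dict.getD_modify]
        by_cases hi : i = t.1
        · subst hi
          rw [if_pos rfl,
            pvGet_set _ n.toNat hrow t.2.1 j' hi0 (by omega) hj0 (by omega) t.2.2]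
          split_ifs with a b b <;> simp_all
        · rw [if_neg hi]
          simp [hi]
      simp only [pvStepI, PySem.Dict.getD_modify]
      by_cases hjc : j' = t.2.1
      · subst hjc
        rw [if_pos rfl, hinv t.2.1 hj0 hj1, PySem.List.pySetD_of_nonneg _ _ hu0]
        apply List.ext_getElem
        · simp
        · intro k hk1 hk2
          have hklt : (k : Int) < m := by
            have := hk2
            simp [PySem.List.length_pyRange_one] at this
            omega
          have hk0 : (0:Int) ≤ (k : Int) := by positivity
          rw [List.getElem_set, List.getElem_map, List.getElem_map,
            PySem.List.getElem_pyRange_one]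
          rw [hset ((0:Int) + k) (by omega) (by omega)]
          split_ifs with a b b
          · rfl
          · exfalso; omega
          · exfalso; omega
          · rfl
      · rw [if_neg hjc, hinv j' hj0 hj1]
        apply List.map_congr_left
        intro i hi
        obtain ⟨hh0, hh1⟩ := PySem.List.mem_pyRange_one.1 hi
        rw [hset i hh0 hh1, if_neg (by tauto)]

-- ===== VERDICT (by name: the statement is the Claim_ definition above) =====
theorem generate_users_items_spec : Claim_equal_generate_users_items := by
  intro ratings m n _ hpre
  unfold Spec_generate_users_items
  have hA : generate_users_items ratings m n
      = ((ratings.foldl (fun st t => (pvStep st.1 t, pvStepI st.2 t)) (pvInit m n, pvInit n m)).1.items,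
         (ratings.foldl (fun st t => (pvStep st.1 t, pvStepI st.2 t)) (pvInit m n, pvInit n m)).2.items) := rfl
  have hB : generate_users_items_alt ratings m n
      = ((ratings.foldl pvStep (pvInit m n)).items,
         (PySem.List.pyRange 0 n 1).map (fun j =>
           (j, (PySem.List.pyRange 0 m 1).map (fun i =>
             PySem.List.pyGetD ((ratings.foldl pvStep (pvInit m n)).getD i []) j none)))) := rfl
  rw [hA, hB, pvFold_pair]
  refine Prod.ext rfl ?_
  have hkeys : (ratings.foldl pvStepI (pvInit n m)).keys = PySem.List.pyRange 0 n 1 := by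
    rw [pvFoldI_keys _ _ ?_, pvInit_keys]
    intro t ht
    exact pvInit_contains n m t.2.1 (hpre t ht).2.2.1 (hpre t ht).2.2.2
  have hnd : (ratings.foldl pvStepI (pvInit n m)).keys.Nodup := by
    rw [hkeys]; exact PySem.List.nodup_pyRange_one 0 n
  show (ratings.foldl pvStepI (pvInit n m)).items = _
  rw [PySem.Dict.items_eq_map_keys _ hnd [], hkeys]
  apply List.map_congr_left
  intro j hj
  obtain ⟨h0, h1⟩ := PySem.List.mem_pyRange_one.1 hj
  refine Prod.ext rfl ?_
  show (ratings.foldl pvStepI (pvInit n m)).getD j [] = _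
  refine pvTranspose m n ratings (pvInit m n) (pvInit n m) hpre ?_ ?_ j h0 h1
  · intro i hh0 hh1
    rw [pvInit_getD]
    simp [hh0, hh1]
  · intro j' hj0 hj1
    rw [pvInit_getD]
    simp only [hj0, hj1, and_self, if_true]
    symm
    rw [List.eq_replicate_iff]
    refine ⟨by simp [PySem.List.length_pyRange_one], ?_⟩
    intro b hb
    obtain ⟨i, hi, rfl⟩ := List.mem_map.1 hb
    obtain ⟨hh0, hh1⟩ := PySem.List.mem_pyRange_one.1 hi
    rw [pvInit_getD]
    simp only [hh0, hh1, and_self, if_true]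
    rw [PySem.List.pyGetD_eq_getElem _ _ hj0 (by simp; omega)]
    simp
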